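-- pv_equiv track=rewrite | github.com/MOSTAFAGTR/grad-project | scripts/generate_project_documentation.py | _h2_spans_outside_fences
-- ===== SOURCE A (Python) =====
-- def _h2_spans_outside_fences(lines: list[str]) -> list[tuple[str, int, int, int]]:
--     """Return (title, start_line, end_line, count) for each ## header outside ``` fences."""
--     in_fence = False
--     headers: list[tuple[str, int]] = []
--     for i, line in enumerate(lines):
--         stripped = line.strip()
--         if stripped.startswith("```"):
--             in_fence = not in_fence
--             continue
--         if in_fence:
--             continue
--         if line.startswith("## ") and not line.startswith("###"):
--             headers.append((line[3:].strip(), i + 1))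
--     spans: list[tuple[str, int, int, int]] = []
--     for j, (name, start) in enumerate(headers):
--         end = headers[j + 1][1] - 1 if j + 1 < len(headers) else len(lines)
--         spans.append((name, start, end, end - start + 1))
--     return spans
-- ===== SOURCE B (Python) =====
-- def _h2_spans_outside_fences(lines: list[str]) -> list[tuple[str, int, int, int]]:
--     """Single pass: track in_fence and the currently-open header; emit each span on transition."""
--     spans: list[tuple[str, int, int, int]] = []
--     in_fence = False
--     open_h = None
--     for i, line in enumerate(lines):
--         if line.strip().startswith("```"):
--             in_fence = not in_fence
--             continue
--         if in_fence or not (line.startswith("## ") and not line.startswith("###")):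
--             continue
--         if open_h is not None:
--             name, start = open_h
--             spans.append((name, start, i, i - start + 1))
--         open_h = (line[3:].strip(), i + 1)
--     if open_h is not None:
--         name, start = open_h
--         n = len(lines)
--         spans.append((name, start, n, n - start + 1))
--     return spans
-- ===== Notes on version B (the rewrite author's own statement) =====
-- stated objective: simpler
-- what changed: Replaces A's two-phase design (collect all headers, then a second indexed loop reading headers[j+1] to compute each span) with one linear pass that keeps only the currently-open header and emits its span when the next header or end of input is reached.
import Mathlib
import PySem

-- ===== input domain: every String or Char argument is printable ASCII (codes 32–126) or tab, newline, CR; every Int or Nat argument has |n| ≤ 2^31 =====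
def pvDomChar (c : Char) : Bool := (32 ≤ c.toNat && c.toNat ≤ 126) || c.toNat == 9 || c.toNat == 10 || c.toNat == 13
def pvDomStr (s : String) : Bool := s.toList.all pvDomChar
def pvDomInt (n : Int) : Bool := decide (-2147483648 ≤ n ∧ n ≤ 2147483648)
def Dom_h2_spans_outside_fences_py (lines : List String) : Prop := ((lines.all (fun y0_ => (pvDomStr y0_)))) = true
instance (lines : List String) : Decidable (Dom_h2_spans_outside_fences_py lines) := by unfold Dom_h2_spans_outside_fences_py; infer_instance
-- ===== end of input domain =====

-- B replaces A's two-phase collect-headers-then-index-ahead design with a single pass keeping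
-- only the currently-open header (objective: simpler); return values are proved equal on all inputs.

-- ===== PORT A =====
-- first loop of A: collect (title, i+1) for each '## ' header outside fences
def pvAHeaders : List String → Int → Bool → List (String × Int)
  | [], _, _ => []
  | line :: rest, i, in_fence =>
    if PySem.Str.startswith (PySem.Str.strip line) "```" then
      pvAHeaders rest (i + 1) (!in_fence)
    else if in_fence then
      pvAHeaders rest (i + 1) in_fence
    else if PySem.Str.startswith line "## " && !(PySem.Str.startswith line "###") then
      (PySem.Str.strip (PySem.Str.slice line (some 3) none), i + 1) :: pvAHeaders rest (i + 1) in_fence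
    else
      pvAHeaders rest (i + 1) in_fence

-- second loop of A: end = next header's start - 1, or len(lines) for the last
def pvASpans : List (String × Int) → Int → List (String × Int × Int × Int)
  | [], _ => []
  | (name, start) :: rest, total =>
    let e := match rest with
      | (_, s2) :: _ => s2 - 1
      | [] => total
    (name, start, e, e - start + 1) :: pvASpans rest total

def h2_spans_outside_fences_py (lines : List String) : List (String × Int × Int × Int) :=
  pvASpans (pvAHeaders lines 0 false) (PySem.List.len lines)

-- ===== PORT B =====
-- single pass of B: state = (in_fence, open header, spans so far)
def pvBLoop : List String → Int → Bool → Option (String × Int) →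
    List (String × Int × Int × Int) → (Option (String × Int) × List (String × Int × Int × Int))
  | [], _, _, openH, spans => (openH, spans)
  | line :: rest, i, in_fence, openH, spans =>
    if PySem.Str.startswith (PySem.Str.strip line) "```" then
      pvBLoop rest (i + 1) (!in_fence) openH spans
    else if in_fence || !(PySem.Str.startswith line "## " && !(PySem.Str.startswith line "###")) then
      pvBLoop rest (i + 1) in_fence openH spans
    else
      let spans' := match openH with
        | some (name, start) => spans ++ [(name, start, i, i - start + 1)]
        | none => spans
      pvBLoop rest (i + 1) in_fence (some (PySem.Str.strip (PySem.Str.slice line (some 3) none), i + 1)) spans'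

def h2_spans_outside_fences_py_alt (lines : List String) : List (String × Int × Int × Int) :=
  match pvBLoop lines 0 false none [] with
  | (none, spans) => spans
  | (some (name, start), spans) =>
    let n := PySem.List.len lines
    spans ++ [(name, start, n, n - start + 1)]

-- ===== PRECONDITION & SPEC =====
def Spec_h2_spans_outside_fences_py (lines : List String) (out : List (String × Int × Int × Int)) : Prop := out = h2_spans_outside_fences_py_alt lines
instance (lines : List String) (out : List (String × Int × Int × Int)) : Decidable (Spec_h2_spans_outside_fences_py lines out) := by unfold Spec_h2_spans_outside_fences_py; infer_instance

-- ===== CLAIM (what is proved, stated in full; the proofs are below) =====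
def Claim_equal_h2_spans_outside_fences_py : Prop := ∀ (lines : List String), Dom_h2_spans_outside_fences_py lines → Spec_h2_spans_outside_fences_py lines (h2_spans_outside_fences_py lines)

-- ===== LEMMAS AND PROOFS =====

-- flush of B's post-loop step, as a function of the loop result
def pvFlush (total : Int) : Option (String × Int) × List (String × Int × Int × Int) → List (String × Int × Int × Int)
  | (none, spans) => spans
  | (some (name, start), spans) => spans ++ [(name, start, total, total - start + 1)]

-- the open header viewed as a (≤1)-element header list
def pvOptList : Option (String × Int) → List (String × Int)
  | none => []
  | some p => [p]

-- Main invariant: flushing B's loop result equals the already-emitted spans followed by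
-- A's spans of (open header ++ remaining headers).
theorem pvBLoop_eq_aSpans (lines : List String) : ∀ (i total : Int) (in_fence : Bool)
    (openH : Option (String × Int)) (spans : List (String × Int × Int × Int)),
    pvFlush total (pvBLoop lines i in_fence openH spans) =
      spans ++ pvASpans (pvOptList openH ++ pvAHeaders lines i in_fence) total := by
  induction lines with
  | nil =>
    intro i total in_fence openH spans
    cases openH with
    | none => simp [pvBLoop, pvFlush, pvAHeaders, pvOptList, pvASpans]
    | some p => cases p; simp [pvBLoop, pvFlush, pvAHeaders, pvOptList, pvASpans]
  | cons line rest ih =>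
    intro i total in_fence openH spans
    simp only [pvBLoop, pvAHeaders]
    by_cases hf : PySem.Str.startswith (PySem.Str.strip line) "```" = true
    · rw [if_pos hf, if_pos hf, ih]
    · rw [if_neg hf, if_neg hf]
      by_cases hin : in_fence = true
      · have hc : (in_fence || !(PySem.Str.startswith line "## " && !PySem.Str.startswith line "###")) = true := by
          rw [hin]; simp
        rw [if_pos hc, if_pos hin, ih]
      · have hinf : in_fence = false := by simpa using hin
        subst hinf
        by_cases hh : (PySem.Str.startswith line "## " && !(PySem.Str.startswith line "###")) = true
        · have hc : ¬ ((false || !(PySem.Str.startswith line "## " && !PySem.Str.startswith line "###")) = true) := by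
            rw [hh]; decide
          rw [if_neg hc, if_pos hh]
          cases openH with
          | none =>
            rw [ih]
            simp [pvOptList]
          | some p =>
            obtain ⟨name, start⟩ := p
            rw [ih]
            have harith : i + 1 - 1 = i := by omega
            simp [pvOptList, pvASpans, harith]
        · have hx : (PySem.Str.startswith line "## " && !(PySem.Str.startswith line "###")) = false := by
            revert hh; cases (PySem.Str.startswith line "## " && !(PySem.Str.startswith line "###")) <;> simp
          have hc : (false || !(PySem.Str.startswith line "## " && !PySem.Str.startswith line "###")) = true := by
            rw [hx]; decide
          rw [if_pos hc, if_neg hh, ih]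
          simp only [Bool.false_eq_true, if_false]

-- ===== VERDICT (by name: the statement is the Claim_ definition above) =====
theorem h2_spans_outside_fences_py_spec : Claim_equal_h2_spans_outside_fences_py := by
  intro lines _
  unfold Spec_h2_spans_outside_fences_py h2_spans_outside_fences_py h2_spans_outside_fences_py_alt
  have h := pvBLoop_eq_aSpans lines 0 (PySem.List.len lines) false none []
  simp only [pvOptList, List.nil_append] at h
  rw [← h]
  cases hb : pvBLoop lines 0 false none [] with
  | mk o s => cases o with
    | none => simp [pvFlush]
    | some p => cases p; simp [pvFlush]
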